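-- pv_equiv track=rewrite | github.com/romeorizzi/portafoglioVoti_public | Algoritmi/2023-02-20/all-CMS-submissions-2023-02-20/20230220T134417.VR465317.two_three_steps_stdio.py | sogni
-- ===== SOURCE A (Python) =====
-- def sogni(corridoio):
--     if len(corridoio)== 0:
--         return [0]
--     elif len(corridoio)== 1:
--         return [corridoio[0]]
--     elif len(corridoio) == 2:
--         possibilita = []
--         p2 = sogni(corridoio[2:])
--         for i in p2:
--             possibilita.append(corridoio[0]+i)
--         return possibilita
--     else:
--         possibilita = []
--         p2 = sogni(corridoio[2:])
--         for i in p2: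
--             possibilita.append(corridoio[0]+i)
--         p3 = sogni(corridoio[3:])
--         for i in p3:
--             possibilita.append(corridoio[0]+i)
--         return possibilita
-- ===== SOURCE B (Python) =====
-- def sogni(corridoio):
--     n = len(corridoio)
--     res = [None] * (n + 1)
--     res[n] = [0]
--     for i in range(n - 1, -1, -1):
--         L = n - i
--         v = corridoio[i]
--         if L == 1:
--             res[i] = [v]
--         elif L == 2:
--             res[i] = [v]
--         else:
--             res[i] = [v + x for x in res[i + 2]] + [v + x for x in res[i + 3]]
--     return res[0]
-- ===== Notes on version B (the rewrite author's own statement) =====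
-- stated objective: alternative
-- what changed: Replaced A's top-down double recursion over list slices with a bottom-up dynamic-programming table indexed by suffix start, so each suffix's result list is built exactly once; the output list itself is exponential in n, so overall running time stays output-bound.
import Mathlib
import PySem

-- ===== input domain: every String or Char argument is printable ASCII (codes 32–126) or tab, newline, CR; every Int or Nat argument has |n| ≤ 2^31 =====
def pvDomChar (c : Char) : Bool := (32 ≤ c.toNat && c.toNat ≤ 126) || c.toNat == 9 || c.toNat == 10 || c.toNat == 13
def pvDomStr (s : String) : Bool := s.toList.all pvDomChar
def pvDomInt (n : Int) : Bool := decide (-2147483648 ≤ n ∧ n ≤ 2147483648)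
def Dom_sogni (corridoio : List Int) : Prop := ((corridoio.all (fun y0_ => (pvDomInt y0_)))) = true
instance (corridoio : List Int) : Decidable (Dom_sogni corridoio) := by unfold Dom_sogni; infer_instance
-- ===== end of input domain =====

-- B replaces A's top-down double recursion over slices with a bottom-up DP table over
-- suffixes (objective: alternative — each suffix result built once; the output itself is
-- exponential in n, so overall cost remains output-bound).

-- ===== PORT A =====
-- literal transliteration of A's recursion: len 0/1 bases, len-2 case maps over
-- sogni(corridoio[2:]) (which is []), else maps over sogni(corridoio[2:]) and sogni(corridoio[3:])
def sogni (corridoio : List Int) : List Int :=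
  match corridoio with
  | [] => [0]
  | [a] => [a]
  | a :: _b :: rest =>
    if rest.length = 0 then
      (sogni rest).map (fun i => a + i)
    else
      (sogni rest).map (fun i => a + i) ++ (sogni (rest.drop 1)).map (fun i => a + i)
termination_by corridoio.length
decreasing_by
  all_goals (simp only [List.length_cons, List.length_drop]; omega)

-- ===== PORT B =====
-- Source B's loop `for i in range(n-1,-1,-1)` building res[i]; after k iterations the
-- table holds [res[n-k], …, res[n]]; sogniAltTab c k is that table.
def sogniAltTab (c : List Int) : Nat → List (List Int)
  | 0 => [[0]]
  | k + 1 =>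
    let t := sogniAltTab c k
    let n := c.length
    let v := c.getD (n - (k + 1)) 0
    let L := k + 1
    let nw :=
      if L = 1 then [v]
      else if L = 2 then [v]
      else (t.getD 1 []).map (fun x => v + x) ++ (t.getD 2 []).map (fun x => v + x)
    nw :: t

def sogni_alt (corridoio : List Int) : List Int :=
  (sogniAltTab corridoio corridoio.length).headI

-- ===== PRECONDITION & SPEC =====
def Spec_sogni (corridoio : List Int) (out : List Int) : Prop := out = sogni_alt corridoio
instance (corridoio : List Int) (out : List Int) : Decidable (Spec_sogni corridoio out) := by unfold Spec_sogni; infer_instance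

-- ===== CLAIM (what is proved, stated in full; the proofs are below) =====
def Claim_equal_sogni : Prop := ∀ (corridoio : List Int), Dom_sogni corridoio → Spec_sogni corridoio (sogni corridoio)

-- ===== LEMMAS AND PROOFS =====

lemma drop_eq_getD_cons (c : List Int) (i : Nat) (h : i < c.length) :
    c.drop i = c.getD i 0 :: c.drop (i + 1) := by
  rw [List.getD_eq_getElem c 0 h, ← List.getElem_cons_drop]

-- the DP table after k iterations is exactly A's results on the k+1 shortest suffixes
lemma sogniAltTab_eq (c : List Int) (k : Nat) (hk : k ≤ c.length) :
    sogniAltTab c k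
      = (List.range (k + 1)).map (fun j => sogni (c.drop (c.length - k + j))) := by
  induction k with
  | zero =>
    simp [sogniAltTab, List.range_succ, List.drop_length, sogni]
  | succ k ih =>
    have hk' : k ≤ c.length := Nat.le_of_succ_le hk
    have ht := ih hk'
    set n := c.length with hn
    have hi : n - (k + 1) < n := by omega
    have hdrop : c.drop (n - (k + 1)) = c.getD (n - (k + 1)) 0 :: c.drop (n - (k + 1) + 1) :=
      drop_eq_getD_cons c _ hi
    have hrange : List.range (k + 2) = 0 :: (List.range (k + 1)).map Nat.succ :=
      List.range_succ_eq_map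
    have htail : (List.range (k + 1)).map
        ((fun j => sogni (c.drop (n - (k + 1) + j))) ∘ Nat.succ)
        = (List.range (k + 1)).map (fun j => sogni (c.drop (n - k + j))) := by
      apply List.map_congr_left
      intro j _
      have : n - (k + 1) + (j + 1) = n - k + j := by omega
      simp [Function.comp, this]
    show (let t := sogniAltTab c k;
          let v := c.getD (n - (k + 1)) 0;
          let nw := if k + 1 = 1 then [v] else if k + 1 = 2 then [v]
            else (t.getD 1 []).map (fun x => v + x) ++ (t.getD 2 []).map (fun x => v + x);
          nw :: t) = _
    rw [hrange]
    simp only [List.map_cons, List.map_map, Nat.add_zero]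
    refine congrArg₂ _ ?_ (ht.trans htail.symm)
    -- head: nw = sogni (c.drop (n - (k+1)))
    match k with
    | 0 =>
      -- suffix of length 1
      have h1 : c.drop (n - 1 + 1) = [] := by
        apply List.drop_eq_nil_of_le; omega
      simp only [reduceIte]
      rw [hdrop, h1]
      simp [sogni]
    | 1 =>
      -- suffix of length 2
      have h2 : c.drop (n - 2 + 1 + 1) = [] := by
        apply List.drop_eq_nil_of_le; omega
      have hi2 : n - 2 + 1 < n := by omega
      have hdrop2 : c.drop (n - 2 + 1) = c.getD (n - 2 + 1) 0 :: c.drop (n - 2 + 1 + 1) :=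
        drop_eq_getD_cons c _ hi2
      simp only [reduceIte]
      rw [hdrop, hdrop2, h2]
      simp [sogni]
    | Nat.succ (Nat.succ k') =>
      -- suffix of length ≥ 3
      set k2 := k' + 2 with hk2
      have hi1 : n - (k2 + 1) + 1 < n := by omega
      have hdrop1 : c.drop (n - (k2 + 1) + 1)
          = c.getD (n - (k2 + 1) + 1) 0 :: c.drop (n - (k2 + 1) + 1 + 1) :=
        drop_eq_getD_cons c _ hi1
      have hrestlen : (c.drop (n - (k2 + 1) + 1 + 1)).length ≠ 0 := by
        simp [List.length_drop]; omega
      have hg1 : ((List.range (k2 + 1)).map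
          (fun j => sogni (c.drop (n - k2 + j)))).getD 1 []
          = sogni (c.drop (n - k2 + 1)) := by
        rw [List.getD_eq_getElem _ _ (by simp; omega)]
        simp
      have hg2 : ((List.range (k2 + 1)).map
          (fun j => sogni (c.drop (n - k2 + j)))).getD 2 []
          = sogni (c.drop (n - k2 + 2)) := by
        rw [List.getD_eq_getElem _ _ (by simp; omega)]
        simp
      rw [if_neg (by omega), if_neg (by omega)]
      rw [ht, hg1, hg2, hdrop, hdrop1]
      have e1 : n - k2 + 1 = n - (k2 + 1) + 1 + 1 := by omega
      have e2 : n - k2 + 2 = n - (k2 + 1) + 1 + 1 + 1 := by omega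
      conv_rhs => rw [sogni]
      rw [if_neg hrestlen]
      rw [e1, e2]
      congr 1
      rw [List.drop_drop]

-- ===== VERDICT (by name: the statement is the Claim_ definition above) =====
theorem sogni_spec : Claim_equal_sogni := by
  intro c _
  show sogni c = sogni_alt c
  unfold sogni_alt
  rw [sogniAltTab_eq c c.length le_rfl, List.range_succ_eq_map]
  simp
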